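-- pv_equiv track=rewrite | github.com/LengyHELL/advent_of_code | 2024/day7/day7.py | calculate_equation
-- ===== SOURCE A (Python) =====
-- def calculate_equation(current: int, test: int, numbers: list[int]):
--     total = 0
--
--     if len(numbers) == 0:
--         return 1 if current == test else 0
--
--     next_numbers = numbers.copy()
--     next_number = next_numbers.pop(0)
--
--     for i in range(3):
--         if i == 0:
--             total += calculate_equation(current + next_number, test, next_numbers)
--         elif i == 1:
--             total += calculate_equation(current * next_number, test, next_numbers)
--         elif i == 2:
--             total += calculate_equation(
--                 int(str(current) + str(next_number)), test, next_numbers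
--             )
--
--     return total
-- ===== SOURCE B (Python) =====
-- def calculate_equation(current: int, test: int, numbers: list[int]):
--     # Iterative breadth-first enumeration: expand a frontier of partial
--     # results left to right, then count the entries equal to test.
--     frontier = [current]
--     for n in numbers:
--         frontier = [w for v in frontier for w in (v + n, v * n, int(str(v) + str(n)))]
--     return sum(1 for v in frontier if v == test)
-- ===== Notes on version B (the rewrite author's own statement) =====
-- stated objective: alternative
-- what changed: Replaces the three-way recursion (DFS with an explicit range(3)/pop dispatch) by an iterative level-by-level frontier: each number expands every partial value into its three successors, and the final frontier is counted for entries equal to test.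
import Mathlib
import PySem

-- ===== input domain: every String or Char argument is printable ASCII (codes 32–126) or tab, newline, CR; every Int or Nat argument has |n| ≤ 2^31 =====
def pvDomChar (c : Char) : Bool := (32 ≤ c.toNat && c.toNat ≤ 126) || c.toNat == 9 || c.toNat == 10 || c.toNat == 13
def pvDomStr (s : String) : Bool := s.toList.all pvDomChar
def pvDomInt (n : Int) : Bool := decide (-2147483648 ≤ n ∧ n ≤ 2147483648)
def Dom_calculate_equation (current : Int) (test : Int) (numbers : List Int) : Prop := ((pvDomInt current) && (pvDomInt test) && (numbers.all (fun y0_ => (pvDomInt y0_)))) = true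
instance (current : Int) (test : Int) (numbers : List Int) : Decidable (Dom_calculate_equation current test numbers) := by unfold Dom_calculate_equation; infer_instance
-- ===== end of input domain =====

-- B replaces A's three-way recursion by an iterative frontier enumeration counted
-- at the end (alternative decomposition, same exhaustive 3^n search).


-- ===== PORT A =====
-- int(str(a) + str(b)): exact wherever Python returns (under Pre_, where b ≥ 0,
-- the parse never fails); the .getD 0 only totalises the excluded raising inputs.
def pyConcat (a : Int) (b : Int) : Int :=
  (PySem.Int.ofStr? (PySem.Int.toStr a ++ PySem.Int.toStr b)).getD 0

def calculate_equation (current : Int) (test : Int) (numbers : List Int) : Int :=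
  match numbers with
  | [] => if current == test then 1 else 0
  | next_number :: next_numbers =>
      -- the range(3) loop: total accumulates the three recursive calls in order
      calculate_equation (current + next_number) test next_numbers
      + calculate_equation (current * next_number) test next_numbers
      + calculate_equation (pyConcat current next_number) test next_numbers

-- ===== PORT B =====
def calculate_equation_alt (current : Int) (test : Int) (numbers : List Int) : Int :=
  let frontier := numbers.foldl
    (fun fr n => fr.flatMap (fun v => [v + n, v * n, pyConcat v n])) [current]
  ((frontier.countP (fun v => v == test) : Nat) : Int)

-- ===== PRECONDITION & SPEC =====
-- Pre_ excludes exactly the inputs on which Python A raises ValueError: a negative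
-- element makes int(str(v) + str(n)) parse a string with an interior '-' sign.
def Pre_calculate_equation (current : Int) (test : Int) (numbers : List Int) : Prop :=
  ∀ n ∈ numbers, 0 ≤ n
instance (current : Int) (test : Int) (numbers : List Int) : Decidable (Pre_calculate_equation current test numbers) := by unfold Pre_calculate_equation; infer_instance
def pvWitness_calculate_equation : Int × Int × List Int := (0, 5, [2, 3])

def Spec_calculate_equation (current : Int) (test : Int) (numbers : List Int) (out : Int) : Prop := out = calculate_equation_alt current test numbers
instance (current : Int) (test : Int) (numbers : List Int) (out : Int) : Decidable (Spec_calculate_equation current test numbers out) := by unfold Spec_calculate_equation; infer_instance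

-- ===== CLAIM (what is proved, stated in full; the proofs are below) =====
def Claim_equal_calculate_equation : Prop := ∀ (current : Int) (test : Int) (numbers : List Int), Dom_calculate_equation current test numbers → Pre_calculate_equation current test numbers → Spec_calculate_equation current test numbers (calculate_equation current test numbers)

-- ===== LEMMAS AND PROOFS =====

-- countP as an Int-valued sum of indicators
lemma countP_eq_sum_map (p : Int → Bool) (l : List Int) :
    ((l.countP p : Nat) : Int) = (l.map (fun v => if p v then (1 : Int) else 0)).sum := by
  induction l with
  | nil => simp
  | cons x xs ih =>
      simp [List.countP_cons, List.map, List.sum_cons, ← ih]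
      by_cases h : p x = true <;> simp [h] <;> omega

lemma sum_map_flatMap (f : Int → Int) (g : Int → List Int) (l : List Int) :
    ((l.flatMap g).map f).sum = (l.map (fun v => ((g v).map f).sum)).sum := by
  induction l with
  | nil => simp
  | cons x xs ih => simp [List.flatMap_cons, List.map_append, List.sum_append, ih]

-- frontier invariant: counting the fully expanded frontier equals summing A over it
lemma frontier_invariant (test : Int) (ns : List Int) : ∀ (fr : List Int),
    (((ns.foldl (fun fr n => fr.flatMap (fun v => [v + n, v * n, pyConcat v n])) fr).countP
        (fun v => v == test) : Nat) : Int)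
      = (fr.map (fun v => calculate_equation v test ns)).sum := by
  induction ns with
  | nil =>
      intro fr
      rw [List.foldl_nil, countP_eq_sum_map]
      simp [calculate_equation]
  | cons n rest ih =>
      intro fr
      rw [List.foldl_cons, ih, sum_map_flatMap]
      congr 1
      apply List.map_congr_left
      intro v _
      simp [calculate_equation, List.map, List.sum_cons]
      ring

-- ===== VERDICT (by name: the statement is the Claim_ definition above) =====
theorem calculate_equation_spec : Claim_equal_calculate_equation := by
  intro current test numbers _ _
  unfold Spec_calculate_equation calculate_equation_alt
  rw [frontier_invariant]
  simp
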